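-- pv_equiv track=rewrite | github.com/Fondamenti18/fondamenti-di-programmazione | students/1807439/homework01/program03.py | coppie_reverse
-- ===== SOURCE A (Python) =====
-- def disordinamento(stringa):
--     '''inserire qui la vostra implementazione'''
--     i=len(stringa)-1
--     seq_dis=[]
--     stringa_dis=''
--     while i>=0:
--         if 'a'<=stringa[i]<='z':
--             seq_dis=[stringa[i]]+seq_dis
--             if stringa[i] in seq_dis[1: ]:
--                 seq_dis.remove(stringa[i])
--         i-=1
--     return stringa_dis.join(seq_dis)
--
-- def ordinamento(stringa):
--     s_ord=''
--     a=disordinamento(stringa)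
--     return s_ord.join(sorted(a))
--
-- def coppie_reverse(s1):
--     d={}
--     i=0
--     s=disordinamento(s1)
--     ss=ordinamento(s1)
--     while i<len(s):                 #slaim ailms
--         d[s[i]]=ss[i]
--         i+=1
--     return d
-- ===== SOURCE B (Python) =====
-- def coppie_reverse(s1):
--     letters = [c for c in s1 if 'a' <= c <= 'z']
--     last = {}
--     for i, c in enumerate(letters):
--         last[c] = i
--     seq = [c for i, c in enumerate(letters) if last[c] == i]
--     return dict(zip(seq, sorted(seq)))
-- ===== Notes on version B (the rewrite author's own statement) =====
-- stated objective: faster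
-- what changed: Replaces A's backward index loop with prepend-and-remove list dedup plus two join/sort helper strings and a positional dict-assignment loop by a forward scan recording each letter's last index in a dict, a filter keeping positions that are last occurrences, and dict(zip(seq, sorted(seq))).
import Mathlib
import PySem

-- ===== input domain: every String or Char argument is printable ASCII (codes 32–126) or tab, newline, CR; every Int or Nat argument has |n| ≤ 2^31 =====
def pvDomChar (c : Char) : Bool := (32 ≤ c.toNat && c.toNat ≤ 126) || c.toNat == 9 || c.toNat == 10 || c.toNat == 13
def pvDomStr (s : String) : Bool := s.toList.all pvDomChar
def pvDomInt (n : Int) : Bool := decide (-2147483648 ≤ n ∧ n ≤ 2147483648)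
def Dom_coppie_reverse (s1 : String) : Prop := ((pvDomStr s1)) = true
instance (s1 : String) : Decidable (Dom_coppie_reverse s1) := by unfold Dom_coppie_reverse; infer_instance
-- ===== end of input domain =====

-- B replaces A's backward prepend-and-remove dedup scan plus positional dict-assignment loop
-- by a forward last-occurrence index table, a filter, and dict(zip(...)); measurably faster by a constant factor.

-- ===== PORT A =====
-- A's while-loops are ported over the character list; stringa[i]/s[i]/ss[i] are always in range
-- in A, so pyGetD's default character is never used.  Python's 'a' <= c <= 'z' and sorted() act on
-- 1-character strings; on those, string comparison is exactly code-point comparison on Char.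
def pvDisStep (seq : List Char) (c : Char) : List Char :=
  if 'a' ≤ c ∧ c ≤ 'z' then
    let seq2 := c :: seq
    if c ∈ PySem.List.slice seq2 (some 1) none then
      ((PySem.List.remove? seq2 c).getD seq2)
    else seq2
  else seq

def pvDisordinamento (s : String) : String :=
  let cs := s.toList
  let seq := (PySem.List.pyRange (PySem.List.len cs - 1) (-1) (-1)).foldl
      (fun seq i => pvDisStep seq (PySem.List.pyGetD cs i ' ')) []
  PySem.Str.join "" (seq.map (fun c => String.ofList [c]))

def pvOrdinamento (s : String) : String :=
  let a := pvDisordinamento s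
  PySem.Str.join "" ((PySem.List.sorted a.toList (fun x => x) false).map (fun c => String.ofList [c]))

def pvCoppieLoop (s ss : List Char) (i : Nat) (d : PySem.Dict String String) :
    PySem.Dict String String :=
  if i < s.length then
    pvCoppieLoop s ss (i + 1)
      (d.insert (String.ofList [PySem.List.pyGetD s (i : Int) ' '])
                (String.ofList [PySem.List.pyGetD ss (i : Int) ' ']))
  else d
  termination_by s.length - i

def coppie_reverse (s1 : String) : List (String × String) :=
  let s := pvDisordinamento s1
  let ss := pvOrdinamento s1
  (pvCoppieLoop s.toList ss.toList 0 PySem.Dict.empty).items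

-- ===== PORT B =====
-- Source B: last-occurrence index table, keep positions that are last occurrences, dict(zip(seq, sorted(seq))).
-- last[c] in Source B can never raise (every c of letters is a key), so getD's default -1 is never used.
def coppie_reverse_alt (s1 : String) : List (String × String) :=
  let letters := s1.toList.filter (fun c => decide ('a' ≤ c) && decide (c ≤ 'z'))
  let last := (PySem.List.enumerate letters).foldl (fun d p => d.insert p.2 p.1)
      (PySem.Dict.empty : PySem.Dict Char Int)
  let seq := ((PySem.List.enumerate letters).filter
      (fun p => last.getD p.2 (-1) == p.1)).map (fun p => p.2)
  (PySem.Dict.ofList ((seq.zip (PySem.List.sorted seq (fun x => x) false)).map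
      (fun p => (String.ofList [p.1], String.ofList [p.2])))).items

-- ===== PRECONDITION & SPEC =====
def Spec_coppie_reverse (s1 : String) (out : List (String × String)) : Prop := out = coppie_reverse_alt s1
instance (s1 : String) (out : List (String × String)) : Decidable (Spec_coppie_reverse s1 out) := by unfold Spec_coppie_reverse; infer_instance

-- ===== CLAIM (what is proved, stated in full; the proofs are below) =====
def Claim_equal_coppie_reverse : Prop := ∀ (s1 : String), Dom_coppie_reverse s1 → Spec_coppie_reverse s1 (coppie_reverse s1)

-- ===== LEMMAS AND PROOFS =====

-- keep-last dedup: the common canonical form both seq computations are reduced to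
def pvDl : List Char → List Char
  | [] => []
  | c :: rest => if c ∈ rest then pvDl rest else c :: pvDl rest

-- index of the last occurrence
def pvLastIdx : List Char → Char → Option Nat
  | [], _ => none
  | a :: rest, c =>
    match pvLastIdx rest c with
    | some k => some (k + 1)
    | none => if a = c then some 0 else none

theorem mem_pvDl (l : List Char) (x : Char) : x ∈ pvDl l ↔ x ∈ l := by
  induction l with
  | nil => simp [pvDl]
  | cons a r ih =>
    by_cases h : a ∈ r
    · simp only [pvDl, if_pos h, ih, List.mem_cons]
      constructor
      · exact Or.inr
      · rintro (rfl | hx); exact h; exact hx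
    · simp [pvDl, if_neg h, List.mem_cons, ih]

theorem nodup_pvDl (l : List Char) : (pvDl l).Nodup := by
  induction l with
  | nil => simp [pvDl]
  | cons a r ih =>
    by_cases h : a ∈ r <;> simp [pvDl, h, ih]
    simpa [mem_pvDl] using h

def pvStep2 (c : Char) (seq : List Char) : List Char :=
  if 'a' ≤ c ∧ c ≤ 'z' then (if c ∈ seq then seq else c :: seq) else seq

theorem pvStep2_apply (c : Char) (seq : List Char) :
    pvStep2 c seq = if 'a' ≤ c ∧ c ≤ 'z' then (if c ∈ seq then seq else c :: seq) else seq := rfl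

theorem pvDisStep_eq : (fun (c : Char) (seq : List Char) => pvDisStep seq c) = pvStep2 := by
  funext c seq
  unfold pvDisStep pvStep2
  split_ifs <;>
    simp_all [PySem.List.slice_from_one, PySem.List.remove?, List.idxOf?_cons]

theorem pv_foldr_congr {α β : Type} (l : List α) (f g : α → β → β) (init : β)
    (h : ∀ x ∈ l, ∀ a, f x a = g x a) : l.foldr f init = l.foldr g init := by
  induction l with
  | nil => rfl
  | cons a r ih =>
    simp only [List.foldr_cons]
    rw [ih (fun x hx a => h x (List.mem_cons_of_mem _ hx) a), h a (List.mem_cons_self)]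

theorem pv_foldr_range_getD (cs : List Char) (g : Char → List Char → List Char)
    (init : List Char) :
    (PySem.List.pyRange 0 (cs.length : Int) 1).foldr
        (fun i seq => g (PySem.List.pyGetD cs i ' ') seq) init
      = cs.foldr g init := by
  induction cs using List.reverseRecOn generalizing init with
  | nil => simp [PySem.List.pyRange_one_eq_nil]
  | append_singleton xs x ih =>
    have hlen : ((xs ++ [x]).length : Int) = (xs.length : Int) + 1 := by
      simp
    rw [hlen, PySem.List.pyRange_one_succ_right (by positivity), List.foldr_append,
      List.foldr_append]
    simp only [List.foldr_cons, List.foldr_nil]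
    have hx : PySem.List.pyGetD (xs ++ [x]) (xs.length : Int) ' ' = x := by
      simp [PySem.List.pyGetD_natCast, List.getD]
    rw [hx]
    rw [pv_foldr_congr _ _ (fun i seq => g (PySem.List.pyGetD xs i ' ') seq) _ ?_, ih]
    intro i hi a
    rw [PySem.List.mem_pyRange_one] at hi
    obtain ⟨k, hk, rfl⟩ : ∃ k : Nat, k < xs.length ∧ i = (k : Int) := by
      refine ⟨i.toNat, by omega, by omega⟩
    simp [PySem.List.pyGetD_natCast, List.getD, List.getElem?_append_left hk]

theorem pv_mem_foldr_step (cs : List Char) (x : Char) :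
    x ∈ cs.foldr pvStep2 [] ↔ ('a' ≤ x ∧ x ≤ 'z') ∧ x ∈ cs := by
  induction cs with
  | nil => simp
  | cons a r ih =>
    rw [List.foldr_cons, pvStep2_apply]
    split_ifs with h1 hm2
    · rw [ih]; simp only [List.mem_cons]; constructor
      · rintro ⟨hl, hx⟩; exact ⟨hl, Or.inr hx⟩
      · rintro ⟨hl, (rfl | hx)⟩
        · exact ⟨hl, (ih.mp hm2).2⟩
        · exact ⟨hl, hx⟩
    · simp only [List.mem_cons]; constructor
      · rintro (rfl | h); exact ⟨h1, Or.inl rfl⟩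
        exact ⟨(ih.mp h).1, Or.inr (ih.mp h).2⟩
      · rintro ⟨hl, (rfl | hx)⟩; exact Or.inl rfl; exact Or.inr (ih.mpr ⟨hl, hx⟩)
    · rw [ih]; simp only [List.mem_cons]; constructor
      · rintro ⟨hl, hx⟩; exact ⟨hl, Or.inr hx⟩
      · rintro ⟨hl, (rfl | hx)⟩; exact absurd hl h1; exact ⟨hl, hx⟩

theorem pv_foldr_step_eq_dl (cs : List Char) :
    cs.foldr pvStep2 []
      = pvDl (cs.filter (fun c => decide ('a' ≤ c) && decide (c ≤ 'z'))) := by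
  induction cs with
  | nil => rfl
  | cons a r ih =>
    rw [List.foldr_cons, pvStep2_apply, List.filter_cons]
    by_cases h1 : ('a' ≤ a ∧ a ≤ 'z')
    · have hb : (decide ('a' ≤ a) && decide (a ≤ 'z')) = true := by simp [h1.1, h1.2]
      rw [if_pos h1, hb, ih, if_pos rfl]
      have hmem : a ∈ r.foldr pvStep2 [] ↔
          a ∈ r.filter (fun c => decide ('a' ≤ c) && decide (c ≤ 'z')) := by
        rw [pv_mem_foldr_step, List.mem_filter]
        simp [h1.1, h1.2]
      show _ = pvDl (a :: _)
      simp only [pvDl]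
      rw [ih] at hmem
      split_ifs with h2 h3 h3
      · rfl
      · exact absurd (hmem.mp h2) h3
      · exact absurd (hmem.mpr h3) h2
      · rfl
    · have hb : (decide ('a' ≤ a) && decide (a ≤ 'z')) = false := by
        rcases not_and_or.mp h1 with h | h <;> simp [h]
      rw [if_neg h1, hb, ih, if_neg (by simp)]

theorem pvDisordinamento_toList (s : String) :
    (pvDisordinamento s).toList
      = pvDl (s.toList.filter (fun c => decide ('a' ≤ c) && decide (c ≤ 'z'))) := by
  simp only [pvDisordinamento]
  have h1 : PySem.List.pyRange (PySem.List.len s.toList - 1) (-1) (-1)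
      = (PySem.List.pyRange 0 (s.toList.length : Int) 1).reverse := by
    rw [PySem.List.pyRange_neg_one_eq_reverse]
    norm_num [PySem.List.len_eq]
  rw [h1, List.foldl_reverse]
  rw [pv_foldr_range_getD s.toList (fun c seq => pvDisStep seq c) []]
  rw [show (fun (c : Char) (seq : List Char) => pvDisStep seq c) = pvStep2 from pvDisStep_eq]
  rw [pv_foldr_step_eq_dl]
  rw [PySem.Str.toList_join]
  simp only [List.map_map]
  have : (List.map (String.toList ∘ fun c => String.ofList [c])
      (pvDl (s.toList.filter (fun c => decide ('a' ≤ c) && decide (c ≤ 'z'))))) =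
      (List.map (fun c => [c])
      (pvDl (s.toList.filter (fun c => decide ('a' ≤ c) && decide (c ≤ 'z'))))) := by
    simp
  rw [this]
  simp [PySem.Chars.join_nil_singletons]

theorem pv_getD_lastFold (l : List Char) (s : Int) (d : PySem.Dict Char Int)
    (c : Char) (dflt : Int) :
    ((PySem.List.enumerate l s).foldl (fun d p => d.insert p.2 p.1) d).getD c dflt
      = match pvLastIdx l c with
        | some k => s + k
        | none => d.getD c dflt := by
  induction l generalizing s d with
  | nil => simp [PySem.List.enumerate, pvLastIdx]
  | cons a r ih =>
    rw [PySem.List.enumerate_cons, List.foldl_cons, ih]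
    cases hr : pvLastIdx r c with
    | some k =>
      simp only [pvLastIdx, hr]
      push_cast; ring_nf
    | none =>
      simp only [pvLastIdx, hr]
      by_cases hac : a = c
      · subst hac; simp
      · rw [if_neg hac, PySem.Dict.getD_insert, if_neg (fun h : c = a => hac h.symm)]

theorem pvLastIdx_eq_none_iff (l : List Char) (c : Char) :
    pvLastIdx l c = none ↔ c ∉ l := by
  induction l with
  | nil => simp [pvLastIdx]
  | cons a r ih =>
    cases hr : pvLastIdx r c with
    | some k =>
      have hcr : c ∈ r := by
        by_contra hm
        rw [ih.mpr hm] at hr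
        cases hr
      simp [pvLastIdx, hr, hcr]
    | none =>
      by_cases hac : a = c
      · subst hac; simp [pvLastIdx, hr]
      · have hcr : c ∉ r := ih.mp hr
        simp only [pvLastIdx, hr, if_neg hac, List.mem_cons, not_or]
        exact ⟨fun _ => ⟨fun h : c = a => hac h.symm, hcr⟩, fun _ => trivial⟩

theorem pvLastIdx_spec (l : List Char) (c : Char) (k : Nat)
    (h : pvLastIdx l c = some k) :
    ∃ hk : k < l.length, l[k] = c ∧ c ∉ l.drop (k + 1) := by
  induction l generalizing k with
  | nil => simp [pvLastIdx] at h
  | cons a r ih =>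
    simp only [pvLastIdx] at h
    cases hr : pvLastIdx r c with
    | some m =>
      rw [hr] at h
      obtain rfl : k = m + 1 := by simpa using h.symm
      obtain ⟨hm, hc, hnd⟩ := ih m hr
      exact ⟨by simpa using Nat.succ_lt_succ hm, by simpa using hc, by simpa using hnd⟩
    | none =>
      rw [hr] at h
      by_cases hac : a = c
      · rw [if_pos hac] at h
        obtain rfl : k = 0 := by simpa using h.symm
        exact ⟨by simp, by simpa using hac, by simpa using (pvLastIdx_eq_none_iff r c).mp hr⟩
      · rw [if_neg hac] at h; simp at h

theorem pvLastIdx_ge (l : List Char) (c : Char) (j : Nat) (hj : j < l.length)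
    (hc : l[j] = c) : ∃ k, pvLastIdx l c = some k ∧ j ≤ k := by
  induction l generalizing j with
  | nil => simp at hj
  | cons a r ih =>
    cases j with
    | zero =>
      simp only [List.getElem_cons_zero] at hc
      cases hr : pvLastIdx r c with
      | some m => exact ⟨m + 1, by simp [pvLastIdx, hr], by omega⟩
      | none => exact ⟨0, by simp [pvLastIdx, hr, hc], le_refl _⟩
    | succ j' =>
      obtain ⟨k, hk, hjk⟩ := ih j' (by simpa using Nat.lt_of_succ_lt_succ hj)
        (by simpa using hc)
      exact ⟨k + 1, by simp [pvLastIdx, hk], by omega⟩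

theorem pv_filter_enum_keeplast (l : List Char) (s : Int) (p : Int × Char → Bool)
    (hp : ∀ j : Nat, (hj : j < l.length) →
      p (s + j, l[j]) = !(decide (l[j] ∈ l.drop (j + 1)))) :
    (((PySem.List.enumerate l s).filter p).map (fun q => q.2)) = pvDl l := by
  induction l generalizing s with
  | nil => simp [PySem.List.enumerate, pvDl]
  | cons a r ih =>
    rw [PySem.List.enumerate_cons, List.filter_cons]
    have h0 : p (s, a) = !(decide (a ∈ r)) := by
      have := hp 0 (by simp)
      simpa using this
    have hr : (((PySem.List.enumerate r (s + 1)).filter p).map (fun q => q.2)) = pvDl r := by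
      apply ih
      intro j hj
      have := hp (j + 1) (by simpa using Nat.succ_lt_succ hj)
      simp only [List.getElem_cons_succ, List.drop_succ_cons] at this
      rw [show s + 1 + (j : Int) = s + (((j + 1 : Nat) : Int)) by push_cast; ring]
      exact this
    by_cases hm : a ∈ r
    · rw [h0]
      simp only [hm, decide_true, Bool.not_true, Bool.false_eq_true, if_false, hr, pvDl]
      simp
    · rw [h0]
      simp only [hm, decide_false, Bool.not_false, if_true, List.map_cons, hr, pvDl]
      simp

theorem pv_seqB_eq (letters : List Char) :
    (((PySem.List.enumerate letters).filter
        (fun p => ((PySem.List.enumerate letters).foldl (fun d p => d.insert p.2 p.1)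
          (PySem.Dict.empty : PySem.Dict Char Int)).getD p.2 (-1) == p.1)).map
        (fun p => p.2)) = pvDl letters := by
  apply pv_filter_enum_keeplast
  intro j hj
  rw [pv_getD_lastFold]
  obtain ⟨k, hk, hjk⟩ := pvLastIdx_ge letters letters[j] j hj rfl
  obtain ⟨hklen, hkc, hknd⟩ := pvLastIdx_spec letters letters[j] k hk
  rw [hk]
  by_cases hmem : letters[j] ∈ letters.drop (j + 1)
  · have hkj : k ≠ j := by
      intro rfl_eq
      subst rfl_eq
      exact hknd hmem
    simp only [hmem, decide_true, Bool.not_true]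
    simpa using fun h => hkj (by exact_mod_cast (by omega : (k : Int) = j))
  · have hkj : k = j := by
      by_contra hne
      have hklt : j < k := by omega
      apply hmem
      have : letters[k] ∈ letters.drop (j + 1) := by
        rw [List.mem_iff_getElem]
        refine ⟨k - (j + 1), by simp; omega, ?_⟩
        rw [List.getElem_drop]
        congr 1
        omega
      rwa [hkc] at this
    subst hkj
    simp [hmem]

theorem pvCoppieLoop_eq (xs ys : List Char) (hl : ys.length = xs.length) :
    ∀ (i : Nat) (d : PySem.Dict String String),
    pvCoppieLoop xs ys i d
      = ((xs.drop i).zip (ys.drop i)).foldl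
          (fun d p => d.insert (String.ofList [p.1]) (String.ofList [p.2])) d := by
  intro i d
  induction hn : xs.length - i generalizing i d with
  | zero =>
    rw [pvCoppieLoop]
    have : ¬ i < xs.length := by omega
    rw [if_neg this]
    rw [List.drop_eq_nil_of_le (by omega)]
    simp
  | succ n ihn =>
    rw [pvCoppieLoop]
    have hi : i < xs.length := by omega
    rw [if_pos hi]
    rw [ihn (i + 1) _ (by omega)]
    have hx : PySem.List.pyGetD xs (i : Int) ' ' = xs[i] := by
      simp [PySem.List.pyGetD_natCast, List.getD, List.getElem?_eq_getElem hi]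
    have hiy : i < ys.length := by omega
    have hy : PySem.List.pyGetD ys (i : Int) ' ' = ys[i] := by
      simp [PySem.List.pyGetD_natCast, List.getD, List.getElem?_eq_getElem hiy]
    rw [hx, hy]
    rw [List.drop_eq_getElem_cons hi, List.drop_eq_getElem_cons hiy,
      List.zip_cons_cons, List.foldl_cons]

theorem pv_ofList_singleton_inj : Function.Injective (fun c : Char => String.ofList [c]) := by
  intro a b h
  have := congrArg String.toList h
  simpa using this

theorem pvOrdinamento_toList (s : String) :
    (pvOrdinamento s).toList
      = PySem.List.sorted
          (pvDl (s.toList.filter (fun c => decide ('a' ≤ c) && decide (c ≤ 'z'))))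
          (fun x => x) false := by
  simp only [pvOrdinamento]
  rw [PySem.Str.toList_join, pvDisordinamento_toList]
  simp only [List.map_map]
  rw [show (String.toList ∘ fun c => String.ofList [c]) = fun c => [c] by funext c; simp]
  simp [PySem.Chars.join_nil_singletons]

theorem pv_keys_nodup (q : List Char) (hnd : q.Nodup) :
    (List.map (fun p : Char × Char => String.ofList [p.1])
      (q.zip (PySem.List.sorted q (fun x => x) false))).Nodup := by
  have hlen : (PySem.List.sorted q (fun x => x) false).length = q.length :=
    PySem.List.length_sorted q _ _
  rw [show (fun p : Char × Char => String.ofList [p.1])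
      = (fun c => String.ofList [c]) ∘ Prod.fst from rfl, ← List.map_map,
    List.map_fst_zip (le_of_eq hlen.symm)]
  exact hnd.map pv_ofList_singleton_inj

theorem pv_main (q : List Char) (hnd : q.Nodup) (s ss : String)
    (hs : s.toList = q) (hss : ss.toList = PySem.List.sorted q (fun x => x) false) :
    (pvCoppieLoop s.toList ss.toList 0 PySem.Dict.empty).items
      = (q.zip (PySem.List.sorted q (fun x => x) false)).map
          (fun p => (String.ofList [p.1], String.ofList [p.2])) := by
  have hlen : (PySem.List.sorted q (fun x => x) false).length = q.length :=
    PySem.List.length_sorted q _ _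
  rw [hs, hss, pvCoppieLoop_eq q _ hlen 0 _]
  simp only [List.drop_zero]
  rw [PySem.Dict.items_foldl_insert_fresh (q.zip (PySem.List.sorted q (fun x => x) false))
      (fun p => String.ofList [p.1]) (fun p => String.ofList [p.2]) PySem.Dict.empty
      (by intro a _; simp) (pv_keys_nodup q hnd)]
  rw [show (PySem.Dict.empty : PySem.Dict String String).items = [] from rfl, List.nil_append]

theorem pv_B_items (seq : List Char) (hnd : seq.Nodup) :
    (PySem.Dict.ofList ((seq.zip (PySem.List.sorted seq (fun x => x) false)).map
        (fun p => (String.ofList [p.1], String.ofList [p.2])))).items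
      = (seq.zip (PySem.List.sorted seq (fun x => x) false)).map
          (fun p => (String.ofList [p.1], String.ofList [p.2])) := by
  show (PySem.Dict.update PySem.Dict.empty _).items = _
  rw [PySem.Dict.update, List.foldl_map]
  rw [PySem.Dict.items_foldl_insert_fresh (seq.zip (PySem.List.sorted seq (fun x => x) false))
      (fun p => String.ofList [p.1]) (fun p => String.ofList [p.2]) PySem.Dict.empty
      (by intro a _; simp) (pv_keys_nodup seq hnd)]
  rw [show (PySem.Dict.empty : PySem.Dict String String).items = [] from rfl, List.nil_append]

-- ===== VERDICT (by name: the statement is the Claim_ definition above) =====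
theorem coppie_reverse_spec : Claim_equal_coppie_reverse := by
  intro s1 _
  show coppie_reverse s1 = coppie_reverse_alt s1
  rw [show coppie_reverse s1
      = (pvCoppieLoop (pvDisordinamento s1).toList (pvOrdinamento s1).toList 0
          PySem.Dict.empty).items from rfl]
  rw [show coppie_reverse_alt s1
      = (PySem.Dict.ofList
          ((((((PySem.List.enumerate
                  (s1.toList.filter (fun c => decide ('a' ≤ c) && decide (c ≤ 'z')))).filter
              (fun p => ((PySem.List.enumerate
                  (s1.toList.filter (fun c => decide ('a' ≤ c) && decide (c ≤ 'z')))).foldl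
                    (fun d p => d.insert p.2 p.1)
                    (PySem.Dict.empty : PySem.Dict Char Int)).getD p.2 (-1) == p.1)).map
              (fun p => p.2))).zip
            (PySem.List.sorted
              ((((PySem.List.enumerate
                  (s1.toList.filter (fun c => decide ('a' ≤ c) && decide (c ≤ 'z')))).filter
              (fun p => ((PySem.List.enumerate
                  (s1.toList.filter (fun c => decide ('a' ≤ c) && decide (c ≤ 'z')))).foldl
                    (fun d p => d.insert p.2 p.1)
                    (PySem.Dict.empty : PySem.Dict Char Int)).getD p.2 (-1) == p.1)).map
              (fun p => p.2))) (fun x => x) false)).map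
            (fun p => (String.ofList [p.1], String.ofList [p.2])))).items from rfl]
  rw [pv_seqB_eq (s1.toList.filter (fun c => decide ('a' ≤ c) && decide (c ≤ 'z')))]
  rw [pv_B_items _ (nodup_pvDl _)]
  exact pv_main _ (nodup_pvDl _) _ _ (pvDisordinamento_toList s1) (pvOrdinamento_toList s1)
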